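-- pv_equiv track=rewrite | github.com/CHHyuk/CodingTestPrac | Programmers_Quiz/ProgrammersQuiz_Lv.2/005.py | solution
-- ===== SOURCE A (Python) =====
-- def solution(s):
--     count_0 = 0
--     count = 1
--     count_0 += s.count('0')
--     s = s.replace('0','')
--
--     while s != '1':
--         s = bin(len(s))[2:]
--         count += 1
--         count_0 += s.count('0')
--         s = s.replace('0','')
--     return [count,count_0]
-- ===== SOURCE B (Python) =====
-- def solution(s):
--     # Pure integer bit arithmetic: no bin(), no string rebuilding.
--     def popcount(n):
--         c = 0
--         while n:
--             c += n & 1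
--             n >>= 1
--         return c
--
--     def bitlen(n):
--         c = 0
--         while n:
--             n >>= 1
--             c += 1
--         return c
--
--     def go(n, steps, zeros):
--         p = popcount(n)
--         z = bitlen(n) - p
--         if p == 1:
--             return [steps + 1, zeros + z]
--         return go(p, steps + 1, zeros + z)
--
--     ones = sum(1 for ch in s if ch != '0')
--     zeros = len(s) - ones
--     if ones == 1 and '1' in s:
--         return [1, zeros]
--     return go(ones, 1, zeros)
-- ===== Notes on version B (the rewrite author's own statement) =====
-- stated objective: alternative
-- what changed: B replaces A's string machinery (bin(), str.count, str.replace) entirely with integer bit arithmetic: it keeps only the popcount of survivors and advances it with hand-rolled shift-and-mask popcount/bit-length loops inside a recursive step function, never materialising any binary string.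
-- outside the precondition, e.g. on solution('0'): A does not finish within the time limit, B raises RecursionError
import Mathlib
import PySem

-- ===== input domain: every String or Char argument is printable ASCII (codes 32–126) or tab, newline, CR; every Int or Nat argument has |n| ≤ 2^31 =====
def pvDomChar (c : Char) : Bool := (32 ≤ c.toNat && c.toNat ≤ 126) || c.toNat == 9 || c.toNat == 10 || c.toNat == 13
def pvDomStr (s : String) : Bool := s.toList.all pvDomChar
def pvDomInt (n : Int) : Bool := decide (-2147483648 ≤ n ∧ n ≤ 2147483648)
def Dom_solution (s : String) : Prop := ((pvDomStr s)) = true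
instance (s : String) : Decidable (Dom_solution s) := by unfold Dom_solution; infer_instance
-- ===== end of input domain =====

-- B drops A's string machinery (bin/count/replace) and tracks only the popcount of the
-- surviving characters with shift-and-mask integer loops; alternative, not claimed faster.

-- ===== PORT A =====
-- bin(n)[2:] for n ≥ 0, as a list of characters ('0'/'1' digits, msb first); exact.
def binChars : Nat → List Char
  | 0 => ['0']
  | 1 => ['1']
  | n+2 => binChars ((n+2)/2) ++ [if (n+2) % 2 = 1 then '1' else '0']

-- the while loop of A; the string state is kept as List Char; s.count('0') and
-- s.replace('0','') are ported by hand as List.count / List.filter (exact for the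
-- single character '0'); fuel only makes the loop total (on Pre_ it never runs out).
def solutionLoop (fuel : Nat) (s : List Char) (count zeros : Int) : List Int :=
  match fuel with
  | 0 => [count, zeros]
  | fuel+1 =>
    if s = ['1'] then [count, zeros]
    else
      solutionLoop fuel ((binChars s.length).filter (· ≠ '0')) (count + 1)
        (zeros + ((binChars s.length).count '0' : Int))

def solution (s : String) : List Int :=
  solutionLoop (s.toList.length + 2) (s.toList.filter (· ≠ '0')) 1
    (s.toList.count '0' : Int)

-- ===== PORT B =====
-- B's popcount: while n: c += n & 1; n >>= 1 — recursion on n/2, exact.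
def popcountB (n : Nat) : Nat :=
  if h : n = 0 then 0 else n % 2 + popcountB (n / 2)
decreasing_by exact Nat.div_lt_self (Nat.pos_of_ne_zero h) one_lt_two

-- B's bitlen: while n: n >>= 1; c += 1 — recursion on n/2, exact.
def bitlenB (n : Nat) : Nat :=
  if h : n = 0 then 0 else 1 + bitlenB (n / 2)
decreasing_by exact Nat.div_lt_self (Nat.pos_of_ne_zero h) one_lt_two

-- B's recursive step function go; fuel is a totality guard only (never exhausted on Pre_).
def goB (fuel : Nat) (n : Nat) (steps zeros : Int) : List Int :=
  match fuel with
  | 0 => [steps, zeros]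
  | fuel+1 =>
    let p := popcountB n
    let z : Int := (bitlenB n : Int) - (p : Int)
    if p = 1 then [steps + 1, zeros + z]
    else goB fuel p (steps + 1) (zeros + z)

def solution_alt (s : String) : List Int :=
  let ones := s.toList.countP (fun c => c ≠ '0')
  let zeros : Int := (s.toList.length : Int) - (ones : Int)
  if ones = 1 ∧ s.toList.contains '1' then [1, zeros]
  else goB (ones + 1) ones 1 zeros

-- ===== PRECONDITION & SPEC =====
-- Pre_ excludes exactly the strings whose characters are all '0' (including the empty
-- string): there A's while loop never terminates (bin(0)[2:] = '0' is removed again),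
-- so A returns on no such input; B never returns there either.
def Pre_solution (s : String) : Prop := s.toList.any (· ≠ '0') = true
instance (s : String) : Decidable (Pre_solution s) := by unfold Pre_solution; infer_instance
def pvWitness_solution : String := "1"

def Spec_solution (s : String) (out : List Int) : Prop := out = solution_alt s
instance (s : String) (out : List Int) : Decidable (Spec_solution s out) := by unfold Spec_solution; infer_instance

-- ===== CLAIM (what is proved, stated in full; the proofs are below) =====
def Claim_equal_solution : Prop := ∀ (s : String), Dom_solution s → Pre_solution s → Spec_solution s (solution s)

-- ===== LEMMAS AND PROOFS =====

lemma binChars_mem (n : Nat) : ∀ c ∈ binChars n, c = '0' ∨ c = '1' := by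
  induction n using binChars.induct with
  | case1 => simp [binChars]
  | case2 => simp [binChars]
  | case3 n ih =>
    intro c hc
    rw [binChars] at hc
    rcases List.mem_append.mp hc with h | h
    · exact ih c h
    · simp at h; subst h; split <;> simp

lemma binChars_length_le (n : Nat) (hn : 1 ≤ n) : (binChars n).length ≤ n := by
  induction n using binChars.induct with
  | case1 => omega
  | case2 => simp [binChars]
  | case3 n ih =>
    rw [binChars, List.length_append]
    have h := ih (by omega)
    simp only [List.length_singleton]
    omega

lemma binChars_count_one_pos (n : Nat) (hn : 1 ≤ n) : 1 ≤ (binChars n).count '1' := by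
  induction n using binChars.induct with
  | case1 => omega
  | case2 => simp [binChars]
  | case3 n ih =>
    rw [binChars, List.count_append]
    have : 1 ≤ (binChars ((n+2)/2)).count '1' := ih (by omega)
    omega

lemma binChars_count_one_lt (n : Nat) (hn : 2 ≤ n) : (binChars n).count '1' < n := by
  match n, hn with
  | n+2, _ =>
    rw [binChars, List.count_append]
    have h1 : (binChars ((n+2)/2)).count '1' ≤ (binChars ((n+2)/2)).length :=
      List.count_le_length
    have h2 : (binChars ((n+2)/2)).length ≤ (n+2)/2 := binChars_length_le _ (by omega)
    have h3 : ([if (n+2) % 2 = 1 then '1' else '0'].count '1') = (n+2) % 2 := by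
      rcases Nat.mod_two_eq_zero_or_one (n+2) with h | h <;> simp [h]
    omega

-- B's popcount computes the number of '1' digits of bin(n)
lemma popcountB_zero : popcountB 0 = 0 := by rw [popcountB]; simp

lemma popcountB_eq (n : Nat) : 1 ≤ n → popcountB n = (binChars n).count '1' := by
  induction n using binChars.induct with
  | case1 => omega
  | case2 =>
    intro _
    rw [popcountB, dif_neg one_ne_zero]
    norm_num [binChars, popcountB_zero]
  | case3 n ih =>
    intro _
    rw [show n.succ.succ = n + 2 from rfl, popcountB, dif_neg (by omega), binChars,
      List.count_append, ih (by omega)]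
    rcases Nat.mod_two_eq_zero_or_one (n+2) with h | h <;> simp [h] <;> omega

-- B's bitlen computes the number of digits of bin(n)
lemma bitlenB_zero : bitlenB 0 = 0 := by rw [bitlenB]; simp

lemma bitlenB_eq (n : Nat) : 1 ≤ n → bitlenB n = (binChars n).length := by
  induction n using binChars.induct with
  | case1 => omega
  | case2 =>
    intro _
    rw [bitlenB, dif_neg one_ne_zero]
    norm_num [binChars, bitlenB_zero]
  | case3 n ih =>
    intro _
    rw [show n.succ.succ = n + 2 from rfl, bitlenB, dif_neg (by omega), binChars,
      List.length_append, ih (by omega)]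
    simp; omega

lemma count01_length : ∀ (l : List Char), (∀ c ∈ l, c = '0' ∨ c = '1') →
    l.count '0' + l.count '1' = l.length
  | [], _ => by simp
  | c :: cs, h => by
    have ih := count01_length cs (fun x hx => h x (List.mem_cons_of_mem _ hx))
    rcases h c (List.mem_cons_self) with rfl | rfl <;>
      simp [List.count_cons, ih] <;> omega

lemma filter_eq_replicate : ∀ (l : List Char), (∀ c ∈ l, c = '0' ∨ c = '1') →
    l.filter (· ≠ '0') = List.replicate (l.count '1') '1'
  | [], _ => by simp
  | c :: cs, h => by
    have hcs : ∀ x ∈ cs, x = '0' ∨ x = '1' := fun x hx => h x (List.mem_cons_of_mem _ hx)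
    have ih := filter_eq_replicate cs hcs
    rcases h c (List.mem_cons_self) with rfl | rfl
    · rw [List.filter_cons, List.count_cons, if_neg (by simp)]
      simpa using ih
    · rw [List.filter_cons, List.count_cons, if_pos (by simp), ih]
      simp [List.replicate_succ]

lemma length_filter_ne : ∀ (cs : List Char),
    (cs.filter (· ≠ '0')).length = cs.length - cs.count '0'
  | [] => by simp
  | c :: l => by
    have ih := length_filter_ne l
    have hle : l.count '0' ≤ l.length := List.count_le_length
    by_cases h : c = '0'
    · subst h
      rw [List.filter_cons, List.count_cons, if_neg (by simp), ih]
      simp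
    · rw [List.filter_cons, List.count_cons, if_pos (by simp [h]), List.length_cons, ih]
      simp [h]
      omega

lemma done0_eq (cs : List Char) :
    (cs.filter (· ≠ '0') = ['1']) ↔ (cs.countP (fun c => c ≠ '0') = 1 ∧ cs.contains '1' = true) := by
  have hmem : (cs.contains '1' = true) ↔ ('1' ∈ cs.filter (· ≠ '0')) := by
    simp [List.mem_filter]
  constructor
  · intro h
    refine ⟨?_, hmem.mpr (by rw [h]; simp)⟩
    rw [List.countP_eq_length_filter, h]; rfl
  · rintro ⟨h1, hm⟩
    rw [List.countP_eq_length_filter] at h1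
    obtain ⟨c, hc⟩ := List.length_eq_one_iff.mp h1
    have hm' : '1' ∈ [c] := by rw [← hc]; exact hmem.mp hm
    have h1c : '1' = c := by simpa using hm'
    rw [hc, ← h1c]

-- core invariant: A's loop on any non-'1' state t equals B's go on n = t.length
lemma step_eq : ∀ (fA fB : Nat) (t : List Char) (steps zeros : Int),
    1 ≤ t.length → t ≠ ['1'] → t.length + 1 < fA → t.length < fB →
    solutionLoop fA t steps zeros = goB fB t.length steps zeros := by
  intro fA
  induction fA with
  | zero => intro fB t steps zeros h1 ht hA hB; omega
  | succ fA ih =>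
    intro fB t steps zeros h1 ht hA hB
    match fB, hB with
    | fB+1, hB =>
      rw [solutionLoop, if_neg ht, goB]
      set L := t.length with hL
      have hp : popcountB L = (binChars L).count '1' := popcountB_eq L h1
      have hz : (bitlenB L : Int) - (popcountB L : Int) = ((binChars L).count '0' : Int) := by
        have h01 := count01_length (binChars L) (binChars_mem L)
        rw [bitlenB_eq L h1, hp]
        omega
      have hfilter := filter_eq_replicate (binChars L) (binChars_mem L)
      simp only [hz]
      by_cases hp1 : popcountB L = 1
      · -- next A state is ['1']: A returns on its next iteration
        have h1' : (binChars L).filter (· ≠ '0') = ['1'] := by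
          rw [hfilter, ← hp, hp1]; rfl
        match fA, (show 1 ≤ fA by omega) with
        | fA+1, _ =>
          rw [if_pos hp1, solutionLoop, if_pos h1']
      · rw [if_neg hp1]
        have hppos : 1 ≤ popcountB L := by
          rw [hp]; exact binChars_count_one_pos L h1
        have hL2 : 2 ≤ L := by
          by_contra h
          have : L = 1 := by omega
          rw [hp, this] at hp1
          exact hp1 (by simp [binChars])
        have hlt : popcountB L < L := by
          rw [hp]; exact binChars_count_one_lt L hL2
        have hlen : ((binChars L).filter (· ≠ '0')).length = popcountB L := by
          rw [hfilter, hp]; simp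
        have hne : (binChars L).filter (· ≠ '0') ≠ ['1'] := by
          intro h
          have := congrArg List.length h
          rw [hlen] at this
          exact hp1 (by simpa using this)
        rw [ih fB ((binChars L).filter (· ≠ '0')) (steps+1)
          (zeros + ((binChars L).count '0' : Int)) (by omega) hne (by omega) (by omega), hlen]

-- ===== VERDICT (by name: the statement is the Claim_ definition above) =====
theorem solution_spec : Claim_equal_solution := by
  intro s _ hpre
  unfold Spec_solution solution solution_alt
  simp only []
  set cs := s.toList with hcs
  have hcf : cs.countP (fun c => c ≠ '0') = (cs.filter (· ≠ '0')).length :=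
    List.countP_eq_length_filter
  have hlen : (cs.filter (· ≠ '0')).length = cs.length - cs.count '0' :=
    length_filter_ne cs
  have hcount : cs.count '0' ≤ cs.length := List.count_le_length
  have hpos : 1 ≤ (cs.filter (· ≠ '0')).length := by
    obtain ⟨c, hc, hne⟩ := List.any_eq_true.mp hpre
    exact List.length_pos_of_mem (List.mem_filter.mpr ⟨hc, hne⟩)
  have hzeros : (cs.length : Int) - (cs.countP (fun c => c ≠ '0') : Int)
      = (cs.count '0' : Int) := by
    rw [hcf]; omega
  rw [hzeros]
  by_cases hdone : cs.filter (· ≠ '0') = ['1']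
  · rw [if_pos ((done0_eq cs).mp hdone)]
    rw [show cs.length + 2 = (cs.length + 1) + 1 from rfl, solutionLoop, if_pos hdone]
  · rw [if_neg (fun h => hdone ((done0_eq cs).mpr h))]
    rw [step_eq (cs.length + 2) (cs.countP (fun c => c ≠ '0') + 1) (cs.filter (· ≠ '0'))
      1 (cs.count '0' : Int) hpos hdone (by omega) (by omega), hcf]
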